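-- pv_equiv track=rewrite | github.com/pkehrer/advent_of_code_2024 | day1.py | get_list_ranks
-- ===== SOURCE A (Python) =====
-- def get_list_ranks(a_list):
--     sorted_list = list(a_list)
--     sorted_list.sort()
--     list_with_ranks = []
--     for num in a_list:
--         rank = sorted_list.index(num)
--         sorted_list[rank] = None
--         list_with_ranks.append([num, rank + 1])
--     return list_with_ranks
-- ===== SOURCE B (Python) =====
-- def get_list_ranks(a_list):
--     s = sorted(a_list)
--     first = {}
--     for i, v in enumerate(s):
--         if v not in first:
--             first[v] = i
--     seen = {}
--     out = []
--     for num in a_list: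
--         k = seen.get(num, 0)
--         seen[num] = k + 1
--         out.append([num, first[num] + k + 1])
--     return out
-- ===== Notes on version B (the rewrite author's own statement) =====
-- stated objective: faster
-- what changed: Replaces the per-element linear scan of a mutated sorted list (.index plus None-ing out slots) by one sort, a first-occurrence-index dict and a per-value tie counter, turning the quadratic loop into a single O(n log n) sort plus two linear passes.
import Mathlib
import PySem

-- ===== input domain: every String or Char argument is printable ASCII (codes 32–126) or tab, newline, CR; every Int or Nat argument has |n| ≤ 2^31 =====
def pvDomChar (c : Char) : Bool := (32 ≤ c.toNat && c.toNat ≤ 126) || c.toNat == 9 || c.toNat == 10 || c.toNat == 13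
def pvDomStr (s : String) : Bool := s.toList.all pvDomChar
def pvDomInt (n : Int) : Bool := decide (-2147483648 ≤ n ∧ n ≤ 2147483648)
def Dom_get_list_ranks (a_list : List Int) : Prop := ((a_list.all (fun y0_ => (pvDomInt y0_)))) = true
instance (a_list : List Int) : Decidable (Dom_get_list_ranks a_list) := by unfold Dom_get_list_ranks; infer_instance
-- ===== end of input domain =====

-- B replaces A's quadratic scan-and-None loop by one sort, a first-occurrence dict and a
-- per-value tie counter (objective: faster, asymptotic in a timing run).

-- ===== PORT A =====
-- A's loop: rank = sorted_list.index(num) (always succeeds: num is still present, proved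
-- below; the .getD 0 default is unreachable), then sorted_list[rank] = None (rank is a
-- valid Nat index, so List.set is exact).
def get_list_ranks (a_list : List Int) : List (List Int) :=
  let sorted_list : List (Option Int) := (PySem.List.sorted a_list (fun x => x) false).map some
  (a_list.foldl
    (fun (st : List (Option Int) × List (List Int)) num =>
      let rank : Nat := (PySem.List.index? st.1 (some num)).getD 0
      (st.1.set rank none, st.2 ++ [[num, (rank : Int) + 1]]))
    (sorted_list, [])).2

-- ===== PORT B =====
-- first[num] always succeeds (num ∈ s), so the KeyError default 0 is unreachable.
def get_list_ranks_alt (a_list : List Int) : List (List Int) :=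
  let s := PySem.List.sorted a_list (fun x => x) false
  let first : PySem.Dict Int Int :=
    (PySem.List.enumerate s 0).foldl
      (fun d p => if d.contains p.2 then d else d.insert p.2 p.1) PySem.Dict.empty
  (a_list.foldl
    (fun (st : PySem.Dict Int Int × List (List Int)) num =>
      let k := st.1.getD num 0
      (st.1.insert num (k + 1), st.2 ++ [[num, first.getD num 0 + k + 1]]))
    (PySem.Dict.empty, [])).2

-- ===== PRECONDITION & SPEC =====
def Spec_get_list_ranks (a_list : List Int) (out : List (List Int)) : Prop := out = get_list_ranks_alt a_list
instance (a_list : List Int) (out : List (List Int)) : Decidable (Spec_get_list_ranks a_list out) := by unfold Spec_get_list_ranks; infer_instance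

-- ===== CLAIM (what is proved, stated in full; the proofs are below) =====
def Claim_equal_get_list_ranks : Prop := ∀ (a_list : List Int), Dom_get_list_ranks a_list → Spec_get_list_ranks a_list (get_list_ranks a_list)

-- ===== LEMMAS AND PROOFS =====

-- number of elements of s strictly below v (= index of v's first occurrence in sorted s)
def fL (v : Int) (s : List Int) : Nat := s.countP (fun x => decide (x < v))

-- bump/dec a multiplicity function at one value
def bump (f : Int → Nat) (v : Int) : Int → Nat := fun y => if y = v then f y + 1 else f y
def decF (f : Int → Nat) (v : Int) : Int → Nat := fun y => if y = v then f y - 1 else f y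

-- s with, for each value x, the first (cnt x) occurrences replaced by None
def mask (cnt : Int → Nat) : List Int → List (Option Int)
  | [] => []
  | x :: xs => if cnt x = 0 then some x :: mask cnt xs else none :: mask (decF cnt x) xs

theorem mask_zero (s : List Int) : mask (fun _ => 0) s = s.map some := by
  induction s with
  | nil => rfl
  | cons x xs ih => simp [mask, ih]

theorem fL_of_le (v : Int) (s : List Int) (h : ∀ y ∈ s, v ≤ y) : fL v s = 0 := by
  simp only [fL, List.countP_eq_zero]
  intro y hy
  simp only [decide_eq_true_eq]
  exact not_lt.2 (h y hy)

theorem L1 (v : Int) : ∀ (s : List Int) (cnt : Int → Nat),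
    s.Pairwise (· ≤ ·) → cnt v < s.count v →
    PySem.List.index? (mask cnt s) (some v) = some (fL v s + cnt v) := by
  intro s
  induction s with
  | nil => intro cnt _ hc; simp at hc
  | cons x xs ih =>
    intro cnt hp hc
    have hx : ∀ y ∈ xs, x ≤ y := (List.pairwise_cons.1 hp).1
    have hxs : xs.Pairwise (· ≤ ·) := (List.pairwise_cons.1 hp).2
    by_cases hxv : x = v
    · subst hxv
      have hfl0 : fL x xs = 0 := fL_of_le x xs hx
      have hflc : fL x (x :: xs) = 0 := by
        simpa [fL, List.countP_cons] using hfl0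
      rcases Nat.eq_zero_or_pos (cnt x) with h0 | hpos
      · have hm : mask cnt (x :: xs) = some x :: mask cnt xs := by simp [mask, h0]
        rw [hm, hflc, h0]
        simpa using PySem.List.index?_cons_self (some x) (mask cnt xs)
      · have hm : mask cnt (x :: xs) = none :: mask (decF cnt x) xs := by
          simp [mask, Nat.pos_iff_ne_zero.1 hpos]
        have hne : (none : Option Int) ≠ some x := by simp
        have hd : decF cnt x x = cnt x - 1 := by simp [decF]
        have hc' : decF cnt x x < xs.count x := by
          have h1 : cnt x < xs.count x + 1 := by simpa [List.count_cons] using hc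
          rw [hd]; omega
        rw [hm, PySem.List.index?_cons_of_ne _ hne, ih (decF cnt x) hxs hc']
        simp only [Option.map_some, Option.some.injEq, hd, hfl0, hflc]
        omega
    · have hvxs : v ∈ xs := by
        have h1 : 0 < xs.count v := by
          have h2 := hc
          simp [List.count_cons, hxv, Ne.symm hxv] at h2
          omega
        exact List.count_pos_iff.1 h1
      have hxlt : x < v := lt_of_le_of_ne (hx v hvxs) hxv
      have hflc : fL v (x :: xs) = fL v xs + 1 := by
        simp [fL, List.countP_cons, hxlt]
      have hcxs : cnt v < xs.count v := by
        have h2 := hc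
        simp [List.count_cons, hxv, Ne.symm hxv] at h2
        omega
      by_cases h0 : cnt x = 0
      · have hm : mask cnt (x :: xs) = some x :: mask cnt xs := by simp [mask, h0]
        have hne : some x ≠ some v := by simpa using hxv
        rw [hm, PySem.List.index?_cons_of_ne _ hne, ih cnt hxs hcxs]
        simp only [Option.map_some, Option.some.injEq, hflc]
        omega
      · have hm : mask cnt (x :: xs) = none :: mask (decF cnt x) xs := by simp [mask, h0]
        have hdv : decF cnt x v = cnt v := by simp [decF, Ne.symm hxv]
        have hne : (none : Option Int) ≠ some v := by simp
        rw [hm, PySem.List.index?_cons_of_ne _ hne,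
            ih (decF cnt x) hxs (by rw [hdv]; exact hcxs)]
        simp only [Option.map_some, Option.some.injEq, hdv, hflc]
        omega

theorem L2 (v : Int) : ∀ (s : List Int) (cnt : Int → Nat),
    s.Pairwise (· ≤ ·) → cnt v < s.count v →
    (mask cnt s).set (fL v s + cnt v) none = mask (bump cnt v) s := by
  intro s
  induction s with
  | nil => intro cnt _ hc; simp at hc
  | cons x xs ih =>
    intro cnt hp hc
    have hx : ∀ y ∈ xs, x ≤ y := (List.pairwise_cons.1 hp).1
    have hxs : xs.Pairwise (· ≤ ·) := (List.pairwise_cons.1 hp).2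
    by_cases hxv : x = v
    · subst hxv
      have hfl0 : fL x xs = 0 := fL_of_le x xs hx
      have hflc : fL x (x :: xs) = 0 := by
        simpa [fL, List.countP_cons] using hfl0
      have hb : bump cnt x x ≠ 0 := by simp [bump]
      have hmb : mask (bump cnt x) (x :: xs) = none :: mask (decF (bump cnt x) x) xs := by
        simp [mask, hb]
      rcases Nat.eq_zero_or_pos (cnt x) with h0 | hpos
      · have hm : mask cnt (x :: xs) = some x :: mask cnt xs := by simp [mask, h0]
        have hfun : decF (bump cnt x) x = cnt := by
          funext y
          by_cases hy : y = x <;> simp [decF, bump, hy]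
        rw [hm, hmb, hfun, hflc, h0]
        rfl
      · obtain ⟨k, hk⟩ : ∃ k, cnt x = k + 1 := ⟨cnt x - 1, by omega⟩
        have hm : mask cnt (x :: xs) = none :: mask (decF cnt x) xs := by simp [mask, hk]
        have hidx : fL x (x :: xs) + cnt x = (fL x xs + k) + 1 := by
          rw [hflc, hfl0, hk]
          omega
        have hd : decF cnt x x = cnt x - 1 := by simp [decF]
        have hc' : decF cnt x x < xs.count x := by
          have h1 : cnt x < xs.count x + 1 := by simpa [List.count_cons] using hc
          rw [hd]; omega
        have hihc := ih (decF cnt x) hxs hc'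
        have harg : fL x xs + decF cnt x x = fL x xs + k := by
          rw [hd]; omega
        rw [harg] at hihc
        have hfun : bump (decF cnt x) x = decF (bump cnt x) x := by
          funext y
          by_cases hy : y = x <;> simp [decF, bump, hy, hk]
        rw [hm, hmb, hidx, List.set_cons_succ, hihc, hfun]
    · have hvxs : v ∈ xs := by
        have h1 : 0 < xs.count v := by
          have h2 := hc
          simp [List.count_cons, hxv, Ne.symm hxv] at h2
          omega
        exact List.count_pos_iff.1 h1
      have hxlt : x < v := lt_of_le_of_ne (hx v hvxs) hxv
      have hflc : fL v (x :: xs) = fL v xs + 1 := by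
        simp [fL, List.countP_cons, hxlt]
      have hcxs : cnt v < xs.count v := by
        have h2 := hc
        simp [List.count_cons, hxv, Ne.symm hxv] at h2
        omega
      have hidx : fL v (x :: xs) + cnt v = (fL v xs + cnt v) + 1 := by
        rw [hflc]; omega
      have hbv : bump cnt v x = cnt x := by simp [bump, hxv]
      by_cases h0 : cnt x = 0
      · have hm : mask cnt (x :: xs) = some x :: mask cnt xs := by simp [mask, h0]
        have hmb : mask (bump cnt v) (x :: xs) = some x :: mask (bump cnt v) xs := by
          simp [mask, hbv, h0]
        rw [hm, hmb, hidx, List.set_cons_succ, ih cnt hxs hcxs]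
      · have hm : mask cnt (x :: xs) = none :: mask (decF cnt x) xs := by simp [mask, h0]
        have hmb : mask (bump cnt v) (x :: xs) = none :: mask (decF (bump cnt v) x) xs := by
          simp [mask, hbv, h0]
        have hdv : decF cnt x v = cnt v := by simp [decF, Ne.symm hxv]
        have hihc := ih (decF cnt x) hxs (by rw [hdv]; exact hcxs)
        rw [hdv] at hihc
        have hfun : bump (decF cnt x) v = decF (bump cnt v) x := by
          funext y
          by_cases hy : y = v
          · subst hy; simp [bump, decF, Ne.symm hxv]
          · by_cases hy2 : y = x <;> simp [bump, decF, hy, hy2, hxv]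
        rw [hm, hmb, hidx, List.set_cons_succ, hihc, hfun]



-- the first-occurrence dict of B: get? v is never overwritten once set
theorem first_preserved (v : Int) (w : Int) :
    ∀ (l : List (Int × Int)) (d : PySem.Dict Int Int), d.get? v = some w →
    (l.foldl (fun d p => if d.contains p.2 then d else d.insert p.2 p.1) d).get? v = some w := by
  intro l
  induction l with
  | nil => intro d h; exact h
  | cons p l ih =>
    intro d h
    simp only [List.foldl_cons]
    by_cases hc : d.contains p.2
    · rw [if_pos hc]; exact ih d h
    · rw [if_neg hc]
      apply ih
      by_cases hp : p.2 = v
      · subst hp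
        rw [PySem.Dict.contains_eq_isSome_get?, h] at hc
        simp at hc
      · rw [PySem.Dict.get?_insert_of_ne _ _ (Ne.symm hp)]
        exact h

-- B's first-occurrence dict: getD v 0 = starting index + fL v s, for v ∈ s, s sorted
theorem first_lemma (v : Int) :
    ∀ (s : List Int) (n : Int) (d : PySem.Dict Int Int),
    s.Pairwise (· ≤ ·) → v ∈ s → d.get? v = none →
    ((PySem.List.enumerate s n).foldl
        (fun d p => if d.contains p.2 then d else d.insert p.2 p.1) d).getD v 0
      = n + (fL v s : Int) := by
  intro s
  induction s with
  | nil => intro n d _ hv _; simp at hv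
  | cons x xs ih =>
    intro n d hp hv hd
    have hx : ∀ y ∈ xs, x ≤ y := (List.pairwise_cons.1 hp).1
    have hxs : xs.Pairwise (· ≤ ·) := (List.pairwise_cons.1 hp).2
    rw [PySem.List.enumerate_cons]
    simp only [List.foldl_cons]
    by_cases hxv : x = v
    · subst hxv
      have hdc : d.contains x = false := by
        rw [PySem.Dict.contains_eq_isSome_get?, hd]; rfl
      rw [hdc]
      simp only [Bool.false_eq_true, if_false]
      have hins : (d.insert x n).get? x = some n := PySem.Dict.get?_insert_self d x n
      have hpres := first_preserved x n (PySem.List.enumerate xs (n + 1)) (d.insert x n) hins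
      rw [PySem.Dict.getD_of_get?_eq_some _ 0 hpres]
      have hfl0 : fL x xs = 0 := fL_of_le x xs hx
      have hflc : fL x (x :: xs) = 0 := by
        simp [fL, List.countP_cons] at *
        omega
      rw [hflc]
      simp
    · have hvxs : v ∈ xs := by
        rcases List.mem_cons.1 hv with h | h
        · exact absurd h.symm hxv
        · exact h
      have hxlt : x < v := lt_of_le_of_ne (hx v hvxs) hxv
      have hflc : fL v (x :: xs) = fL v xs + 1 := by
        simp [fL, List.countP_cons, hxlt]
      have hstep : ∀ d' : PySem.Dict Int Int, d'.get? v = none →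
          ((PySem.List.enumerate xs (n + 1)).foldl
            (fun d p => if d.contains p.2 then d else d.insert p.2 p.1) d').getD v 0
          = n + (fL v (x :: xs) : Int) := by
        intro d' hd'
        rw [ih (n + 1) d' hxs hvxs hd', hflc]
        push_cast
        ring
      by_cases hc : d.contains x
      · rw [if_pos hc]
        exact hstep d hd
      · rw [if_neg hc]
        apply hstep
        rw [PySem.Dict.get?_insert_of_ne _ _ (Ne.symm hxv)]
        exact hd

-- the two loop bodies, named so the main induction can speak about them
def stepA (st : List (Option Int) × List (List Int)) (num : Int) :
    List (Option Int) × List (List Int) :=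
  let rank : Nat := (PySem.List.index? st.1 (some num)).getD 0
  (st.1.set rank none, st.2 ++ [[num, (rank : Int) + 1]])

def stepB (first : PySem.Dict Int Int) (st : PySem.Dict Int Int × List (List Int)) (num : Int) :
    PySem.Dict Int Int × List (List Int) :=
  let k := st.1.getD num 0
  (st.1.insert num (k + 1), st.2 ++ [[num, first.getD num 0 + k + 1]])

theorem main_lemma (s : List Int) (first : PySem.Dict Int Int)
    (hs : s.Pairwise (· ≤ ·))
    (hf : ∀ v ∈ s, first.getD v 0 = (fL v s : Int)) :
    ∀ (rem : List Int) (cnt : Int → Nat) (seen : PySem.Dict Int Int)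
      (acc : List (List Int)),
    (∀ v, seen.getD v 0 = (cnt v : Int)) →
    (∀ v, cnt v + rem.count v ≤ s.count v) →
    (rem.foldl stepA (mask cnt s, acc)).2 = (rem.foldl (stepB first) (seen, acc)).2 := by
  intro rem
  induction rem with
  | nil => intro cnt seen acc _ _; rfl
  | cons x xs ih =>
    intro cnt seen acc hseen hcnt
    have hcx : cnt x < s.count x := by
      have := hcnt x
      simp [List.count_cons] at this
      omega
    have hxs2 : x ∈ s := List.count_pos_iff.1 (by omega)
    simp only [List.foldl_cons]
    have hA : stepA (mask cnt s, acc) x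
        = (mask (bump cnt x) s, acc ++ [[x, ((fL x s + cnt x : Nat) : Int) + 1]]) := by
      simp only [stepA, L1 x s cnt hs hcx, Option.getD_some]
      rw [L2 x s cnt hs hcx]
    have hB : stepB first (seen, acc) x
        = (seen.insert x ((cnt x : Int) + 1), acc ++ [[x, (fL x s : Int) + (cnt x : Int) + 1]]) := by
      simp only [stepB, hseen x, hf x hxs2]
    rw [hA, hB]
    have hval : ((fL x s + cnt x : Nat) : Int) + 1 = (fL x s : Int) + (cnt x : Int) + 1 := by
      push_cast; ring
    rw [hval]
    apply ih
    · intro v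
      rw [PySem.Dict.getD_insert]
      by_cases hv : v = x
      · subst hv; simp [bump]
      · simp [hv, bump, hseen v]
    · intro v
      have hv2 := hcnt v
      by_cases hv : v = x
      · subst hv; simp [bump, List.count_cons] at hv2 ⊢; omega
      · simp [bump, hv, List.count_cons, Ne.symm hv] at hv2 ⊢
        omega

-- ===== VERDICT (by name: the statement is the Claim_ definition above) =====
theorem get_list_ranks_spec : Claim_equal_get_list_ranks := by
  intro a_list _
  unfold Spec_get_list_ranks get_list_ranks get_list_ranks_alt
  simp only []
  set s := PySem.List.sorted a_list (fun x => x) false with hsdef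
  set first := (PySem.List.enumerate s 0).foldl
      (fun d p => if d.contains p.2 then d else d.insert p.2 p.1) PySem.Dict.empty with hfdef
  have hs : s.Pairwise (· ≤ ·) := by
    have := PySem.List.sorted_pairwise (xs := a_list) (key := fun x => x)
    simpa using this
  have hperm : s.Perm a_list := PySem.List.sorted_perm a_list (fun x => x) false
  have hf : ∀ v ∈ s, first.getD v 0 = (fL v s : Int) := by
    intro v hv
    have h1 := first_lemma v s 0 PySem.Dict.empty hs hv (PySem.Dict.get?_empty v)
    rw [← hfdef] at h1
    omega
  have hmain := main_lemma s first hs hf a_list (fun _ => 0) PySem.Dict.empty []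
    (fun v => PySem.Dict.getD_empty v 0)
    (fun v => by simp [hperm.count_eq])
  rw [mask_zero] at hmain
  exact hmain
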